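-- pv_equiv track=rewrite | github.com/NickHollingsworth/bookLayout | tools/build/preprocess.py | preprocess_text_add_pages
-- ===== SOURCE A (Python) =====
-- PAGE_DIRECTIVE = "[[page]]"
--
-- def preprocess_text_add_pages(md_text: str) -> str:
--     lines = md_text.splitlines()
--     out: list[str] = []
--
--     page_num = 1
--     out.append(f'<section class="page" data-page="{page_num}">')
--     out.append("")
--
--     for line in lines:
--         if line.strip() == PAGE_DIRECTIVE:
--             out.append("")
--             out.append("</section>")
--             out.append("")
--
--             page_num += 1
--             out.append(f'<section class="page" data-page="{page_num}">')
--             out.append("")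
--         else:
--             out.append(line)
--
--     out.append("")
--     out.append("</section>")
--
--     return "\n".join(out) + "\n"
-- ===== SOURCE B (Python) =====
-- PAGE_DIRECTIVE = "[[page]]"
--
-- def preprocess_text_add_pages(md_text: str) -> str:
--     # Partition the lines into per-page groups at directive lines, then
--     # render each group as one section block and glue blocks with a blank line.
--     groups = [[]]
--     for line in md_text.splitlines():
--         if line.strip() == PAGE_DIRECTIVE:
--             groups.append([])
--         else:
--             groups[-1].append(line)
--
--     blocks = [
--         [f'<section class="page" data-page="{k}">', "", *group, "", "</section>"]
--         for k, group in enumerate(groups, start=1)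
--     ]
--
--     out = blocks[0]
--     for block in blocks[1:]:
--         out = out + [""] + block
--     return "\n".join(out) + "\n"
-- ===== Notes on version B (the rewrite author's own statement) =====
-- stated objective: alternative
-- what changed: Replaced A's stateful per-line open/close loop (page counter and emitted tags interleaved with line output) by a partition-then-map: split the lines into per-page groups at directive lines, render each group as a complete section block, and join blocks with one blank line.
import Mathlib
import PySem

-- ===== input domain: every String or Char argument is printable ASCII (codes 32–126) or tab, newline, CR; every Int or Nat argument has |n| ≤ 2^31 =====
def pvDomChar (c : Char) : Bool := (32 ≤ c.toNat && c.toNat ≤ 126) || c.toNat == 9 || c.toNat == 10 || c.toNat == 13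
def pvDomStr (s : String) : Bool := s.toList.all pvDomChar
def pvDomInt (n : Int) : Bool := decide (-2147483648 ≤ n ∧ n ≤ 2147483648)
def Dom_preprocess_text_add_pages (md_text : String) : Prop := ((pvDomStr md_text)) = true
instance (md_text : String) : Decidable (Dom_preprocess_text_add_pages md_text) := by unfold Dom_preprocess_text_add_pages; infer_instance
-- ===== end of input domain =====

-- B wraps markdown into page sections by partitioning lines into groups and mapping each
-- group to a section block, instead of A's stateful open/close loop; objective: alternative.

-- shared helper: the f-string '<section class="page" data-page="{k}">'
def pvHeader (k : Int) : String :=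
  "<section class=\"page\" data-page=\"" ++ PySem.Int.toStr k ++ "\">"

-- ===== PORT A =====
def preprocess_text_add_pages (md_text : String) : String :=
  let lines := PySem.Str.splitlines md_text
  let init : List String × Int := ([pvHeader 1, ""], 1)
  let r := lines.foldl (fun (st : List String × Int) line =>
    if PySem.Str.strip line == "[[page]]" then
      (st.1 ++ ["", "</section>", "", pvHeader (st.2 + 1), ""], st.2 + 1)
    else
      (st.1 ++ [line], st.2)) init
  PySem.Str.join "\n" (r.1 ++ ["", "</section>"]) ++ "\n"

-- ===== PORT B =====
-- partition the line list into per-page groups at directive lines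
def pvGroups : List String → List (List String)
  | [] => [[]]
  | l :: ls =>
    if PySem.Str.strip l == "[[page]]" then [] :: pvGroups ls
    else
      match pvGroups ls with
      | g :: gs => (l :: g) :: gs
      | [] => [[l]]   -- unreachable: pvGroups never returns []

def pvBlock (k : Int) (g : List String) : List String :=
  pvHeader k :: "" :: (g ++ ["", "</section>"])

def preprocess_text_add_pages_alt (md_text : String) : String :=
  let groups := pvGroups (PySem.Str.splitlines md_text)
  let blocks := (PySem.List.enumerate groups 1).map (fun p => pvBlock p.1 p.2)
  let out := match blocks with
    | [] => []
    | b :: bs => bs.foldl (fun acc b' => acc ++ [""] ++ b') b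
  PySem.Str.join "\n" out ++ "\n"

-- ===== PRECONDITION & SPEC =====
def Spec_preprocess_text_add_pages (md_text : String) (out : String) : Prop := out = preprocess_text_add_pages_alt md_text
instance (md_text : String) (out : String) : Decidable (Spec_preprocess_text_add_pages md_text out) := by unfold Spec_preprocess_text_add_pages; infer_instance

-- ===== CLAIM (what is proved, stated in full; the proofs are below) =====
def Claim_equal_preprocess_text_add_pages : Prop := ∀ (md_text : String), Dom_preprocess_text_add_pages md_text → Spec_preprocess_text_add_pages md_text (preprocess_text_add_pages md_text)

-- ===== LEMMAS AND PROOFS =====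

-- A's remaining output after the prefix [header n, ""], as a recursion over the lines
def pvTail : List String → Int → List String
  | [], _ => ["", "</section>"]
  | l :: ls, n =>
    if PySem.Str.strip l == "[[page]]" then
      "" :: "</section>" :: "" :: pvHeader (n + 1) :: "" :: pvTail ls (n + 1)
    else l :: pvTail ls n

-- B's block concatenation, closed form
def pvCat : List (List String) → List String
  | [] => []
  | b :: bs => b ++ bs.flatMap (fun b' => "" :: b')

theorem pvTail_cons_pos {l : String} {ls : List String} {n : Int}
    (h : (PySem.Str.strip l == "[[page]]") = true) :
    pvTail (l :: ls) n = "" :: "</section>" :: "" :: pvHeader (n + 1) :: "" :: pvTail ls (n + 1) := by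
  simp [pvTail, h]

theorem pvTail_cons_neg {l : String} {ls : List String} {n : Int}
    (h : ¬ (PySem.Str.strip l == "[[page]]") = true) :
    pvTail (l :: ls) n = l :: pvTail ls n := by
  simp [pvTail, h]

theorem pvGroups_cons_pos {l : String} {ls : List String}
    (h : (PySem.Str.strip l == "[[page]]") = true) :
    pvGroups (l :: ls) = [] :: pvGroups ls := by
  simp [pvGroups, h]

theorem pvGroups_cons_neg {l : String} {ls : List String} {g : List String} {gs : List (List String)}
    (h : ¬ (PySem.Str.strip l == "[[page]]") = true) (hg : pvGroups ls = g :: gs) :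
    pvGroups (l :: ls) = (l :: g) :: gs := by
  simp [pvGroups, h, hg]

theorem pvGroups_ne_nil (ls : List String) : pvGroups ls ≠ [] := by
  cases ls with
  | nil => simp [pvGroups]
  | cons l ls =>
    unfold pvGroups
    split
    · simp
    · cases h : pvGroups ls <;> simp

theorem pvCat_cons (b : List String) (bs : List (List String)) :
    pvCat (b :: bs) = b ++ bs.flatMap (fun b' => "" :: b') := rfl

theorem pvCat_cons_cons (b b' : List String) (bs : List (List String)) :
    pvCat (b :: b' :: bs) = b ++ "" :: pvCat (b' :: bs) := by
  simp [pvCat]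

theorem pvA_foldl (ls : List String) :
    ∀ (acc : List String) (n : Int),
      (ls.foldl (fun (st : List String × Int) line =>
        if PySem.Str.strip line == "[[page]]" then
          (st.1 ++ ["", "</section>", "", pvHeader (st.2 + 1), ""], st.2 + 1)
        else (st.1 ++ [line], st.2)) (acc, n)).1 ++ ["", "</section>"]
      = acc ++ pvTail ls n := by
  induction ls with
  | nil => intro acc n; simp [pvTail]
  | cons l ls ih =>
    intro acc n
    rw [List.foldl_cons]
    by_cases h : (PySem.Str.strip l == "[[page]]") = true
    · rw [if_pos h, ih, pvTail_cons_pos h]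
      simp
    · rw [if_neg h, ih, pvTail_cons_neg h]
      simp

theorem pvB_foldl (bs : List (List String)) :
    ∀ (b : List String),
      bs.foldl (fun acc b' => acc ++ [""] ++ b') b = b ++ bs.flatMap (fun b' => "" :: b') := by
  induction bs with
  | nil => intro b; simp
  | cons x xs ih =>
    intro b
    rw [List.foldl_cons, ih]
    simp

-- the key correspondence: A's prefixed tail equals B's concatenated blocks
theorem pvCorrespond (ls : List String) :
    ∀ (n : Int),
      pvHeader n :: "" :: pvTail ls n
      = pvCat ((PySem.List.enumerate (pvGroups ls) n).map (fun p => pvBlock p.1 p.2)) := by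
  induction ls with
  | nil =>
    intro n
    simp [pvGroups, pvTail, pvCat, pvBlock,
      PySem.List.enumerate_cons, PySem.List.enumerate_nil]
  | cons l ls ih =>
    intro n
    obtain ⟨g, gs, hg⟩ : ∃ g gs, pvGroups ls = g :: gs := by
      cases hgs : pvGroups ls with
      | nil => exact absurd hgs (pvGroups_ne_nil ls)
      | cons g gs => exact ⟨g, gs, rfl⟩
    by_cases h : (PySem.Str.strip l == "[[page]]") = true
    · have ih' := ih (n + 1)
      rw [hg] at ih'
      rw [pvGroups_cons_pos h, pvTail_cons_pos h, hg]
      simp only [PySem.List.enumerate_cons, List.map_cons] at ih' ⊢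
      rw [pvCat_cons_cons, ← ih']
      simp [pvBlock]
    · have ih' := ih n
      rw [hg] at ih'
      rw [pvGroups_cons_neg h hg, pvTail_cons_neg h]
      simp only [PySem.List.enumerate_cons, List.map_cons, pvCat_cons, pvBlock] at ih' ⊢
      have htl : pvTail ls n = (g ++ ["", "</section>"]) ++
          ((PySem.List.enumerate gs (n + 1)).map
            (fun p => pvHeader p.1 :: "" :: (p.2 ++ ["", "</section>"]))).flatMap
              (fun b' => "" :: b') := by
        have hd := congrArg (List.drop 2) ih'
        simpa using hd
      rw [htl]
      simp

-- ===== VERDICT (by name: the statement is the Claim_ definition above) =====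
theorem preprocess_text_add_pages_spec : Claim_equal_preprocess_text_add_pages := by
  intro md_text _
  unfold Spec_preprocess_text_add_pages
  simp only [preprocess_text_add_pages, preprocess_text_add_pages_alt]
  rw [pvA_foldl]
  have hc := pvCorrespond (PySem.Str.splitlines md_text) 1
  cases hbs : (PySem.List.enumerate (pvGroups (PySem.Str.splitlines md_text)) 1).map
      (fun p => pvBlock p.1 p.2) with
  | nil =>
    exfalso
    apply pvGroups_ne_nil (PySem.Str.splitlines md_text)
    cases hgs : pvGroups (PySem.Str.splitlines md_text) with
    | nil => rfl
    | cons g gs => rw [hgs, PySem.List.enumerate_cons] at hbs; simp at hbs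
  | cons b bs =>
    rw [hbs] at hc
    rw [pvCat_cons] at hc
    rw [show (match b :: bs with
        | [] => ([] : List String)
        | b :: bs => List.foldl (fun acc b' => acc ++ [""] ++ b') b bs)
        = List.foldl (fun acc b' => acc ++ [""] ++ b') b bs from rfl, pvB_foldl]
    rw [show [pvHeader 1, ""] ++ pvTail (PySem.Str.splitlines md_text) 1
        = pvHeader 1 :: "" :: pvTail (PySem.Str.splitlines md_text) 1 from rfl, hc]
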